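-- pv_equiv track=rewrite | github.com/michaelwbrigham/noursamycin_project | amino_acid_res.py | get_key_alignmentpositions
-- ===== SOURCE A (Python) =====
-- def get_key_alignmentpositions(key_asno_positions, asno_alignment):
--     counter = 0
--     position_c = 0
--     key_residues = []
--     key_alignment_positions = []
--
--     for position in asno_alignment:
--         position_c = position_c + 1
--
--         if position != '-':
--             counter = counter + 1
--
--             if counter in key_asno_positions:
--                 key_residues.append(position)
--                 key_alignment_positions.append(position_c)
--
--     return key_alignment_positions
-- ===== SOURCE B (Python) =====
-- def get_key_alignmentpositions(key_asno_positions, asno_alignment):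
--     idx = {}
--     counter = 0
--     for position_c, ch in enumerate(asno_alignment, 1):
--         if ch != '-':
--             counter += 1
--             idx[counter] = position_c
--     return [idx[n] for n in sorted(set(key_asno_positions)) if n in idx]
-- ===== Notes on version B (the rewrite author's own statement) =====
-- stated objective: faster
-- what changed: Instead of scanning the alignment and testing each residue counter for membership in the key list, B builds a counter-to-alignment-position index dict in one pass and then iterates over sorted(set(key_asno_positions)), looking each key up in the index.
import Mathlib
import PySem

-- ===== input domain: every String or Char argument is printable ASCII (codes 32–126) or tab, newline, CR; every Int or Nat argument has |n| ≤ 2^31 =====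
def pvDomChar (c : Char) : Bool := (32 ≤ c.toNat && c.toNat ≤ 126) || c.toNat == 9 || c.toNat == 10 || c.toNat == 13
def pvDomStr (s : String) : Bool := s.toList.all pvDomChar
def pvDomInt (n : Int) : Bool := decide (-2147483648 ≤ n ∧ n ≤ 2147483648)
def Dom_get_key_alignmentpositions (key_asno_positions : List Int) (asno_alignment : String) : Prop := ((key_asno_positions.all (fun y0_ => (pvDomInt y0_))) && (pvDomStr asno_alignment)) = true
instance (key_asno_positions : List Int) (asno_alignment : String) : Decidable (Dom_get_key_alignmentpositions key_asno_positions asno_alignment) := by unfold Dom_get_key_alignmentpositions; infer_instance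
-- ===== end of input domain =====

-- B builds a counter→alignment-position index in one pass, then looks up sorted(set(keys)); same return values as A's scan-and-test loop.


-- ===== PORT A =====
-- loop body of A (state: counter, position_c, key_residues, key_alignment_positions)
def stepA (key_asno_positions : List Int) (st : Int × Int × List Char × List Int)
    (position : Char) : Int × Int × List Char × List Int :=
  let position_c := st.2.1 + 1
  if position ≠ '-' then
    let counter := st.1 + 1
    if counter ∈ key_asno_positions then
      (counter, position_c, st.2.2.1 ++ [position], st.2.2.2 ++ [position_c])
    else (counter, position_c, st.2.2.1, st.2.2.2)
  else (st.1, position_c, st.2.2.1, st.2.2.2)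

def get_key_alignmentpositions (key_asno_positions : List Int) (asno_alignment : String) : List Int :=
  (asno_alignment.toList.foldl (stepA key_asno_positions) (0, 0, [], [])).2.2.2

-- ===== PORT B =====
-- loop body of B (state: counter, position_c, idx)
def stepB (st : Int × Int × PySem.Dict Int Int) (ch : Char) : Int × Int × PySem.Dict Int Int :=
  let position_c := st.2.1 + 1
  if ch ≠ '-' then
    let counter := st.1 + 1
    (counter, position_c, st.2.2.insert counter position_c)
  else (st.1, position_c, st.2.2)

def get_key_alignmentpositions_alt (key_asno_positions : List Int) (asno_alignment : String) : List Int :=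
  (PySem.List.sorted (PySem.Set.ofList key_asno_positions) (fun x => x) false).filterMap
    (fun n => ((asno_alignment.toList.foldl stepB (0, 0, PySem.Dict.empty)).2.2).get? n)

-- ===== PRECONDITION & SPEC =====
def Spec_get_key_alignmentpositions (key_asno_positions : List Int) (asno_alignment : String) (out : List Int) : Prop := out = get_key_alignmentpositions_alt key_asno_positions asno_alignment
instance (key_asno_positions : List Int) (asno_alignment : String) (out : List Int) : Decidable (Spec_get_key_alignmentpositions key_asno_positions asno_alignment out) := by unfold Spec_get_key_alignmentpositions; infer_instance

-- ===== CLAIM (what is proved, stated in full; the proofs are below) =====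
def Claim_equal_get_key_alignmentpositions : Prop := ∀ (key_asno_positions : List Int) (asno_alignment : String), Dom_get_key_alignmentpositions key_asno_positions asno_alignment → Spec_get_key_alignmentpositions key_asno_positions asno_alignment (get_key_alignmentpositions key_asno_positions asno_alignment)

-- ===== LEMMAS AND PROOFS =====

/-- The (counter, 1-based alignment position) pairs of the non-gap characters of `s`,
    starting from counter `c` and position `p`. -/
def pairsOf : List Char → Int → Int → List (Int × Int)
  | [], _, _ => []
  | ch :: t, c, p =>
    if ch ≠ '-' then (c + 1, p + 1) :: pairsOf t (c + 1) (p + 1) else pairsOf t c (p + 1)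

lemma pairsOf_fst_gt : ∀ (s : List Char) (c p : Int), ∀ q ∈ pairsOf s c p, c < q.1 := by
  intro s
  induction s with
  | nil => intro c p q hq; simp [pairsOf] at hq
  | cons ch t ih =>
    intro c p q hq
    by_cases h : ch = '-'
    · rw [pairsOf, if_neg (not_not_intro h)] at hq
      exact ih c (p + 1) q hq
    · rw [pairsOf, if_pos h] at hq
      rcases List.mem_cons.1 hq with hq | hq
      · subst hq; omega
      · have := ih (c + 1) (p + 1) q hq; omega

lemma pairsOf_pairwise : ∀ (s : List Char) (c p : Int),
    (pairsOf s c p).Pairwise (fun a b => a.1 < b.1) := by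
  intro s
  induction s with
  | nil => intro c p; simp [pairsOf]
  | cons ch t ih =>
    intro c p
    by_cases h : ch = '-'
    · rw [pairsOf, if_neg (not_not_intro h)]
      exact ih c (p + 1)
    · rw [pairsOf, if_pos h]
      exact List.Pairwise.cons (fun q hq => pairsOf_fst_gt t (c + 1) (p + 1) q hq)
        (ih (c + 1) (p + 1))

/-- A's loop appends exactly the positions of the `pairsOf` pairs whose counter is a key. -/
lemma foldA_eq (K : List Int) : ∀ (s : List Char) (c p : Int) (kr : List Char) (kap : List Int),
    (s.foldl (stepA K) (c, p, kr, kap)).2.2.2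
      = kap ++ ((pairsOf s c p).filter (fun q => decide (q.1 ∈ K))).map Prod.snd := by
  intro s
  induction s with
  | nil => intro c p kr kap; simp [pairsOf]
  | cons ch t ih =>
    intro c p kr kap
    rw [List.foldl_cons, pairsOf]
    by_cases h : ch = '-'
    · rw [if_neg (not_not_intro h)]
      have hst : stepA K (c, p, kr, kap) ch = (c, p + 1, kr, kap) := by
        simp [stepA, h]
      rw [hst]
      exact ih c (p + 1) kr kap
    · rw [if_pos h]
      by_cases hk : (c + 1) ∈ K
      · have hst : stepA K (c, p, kr, kap) ch
            = (c + 1, p + 1, kr ++ [ch], kap ++ [p + 1]) := by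
          simp [stepA, h, hk]
        rw [hst, ih (c + 1) (p + 1) (kr ++ [ch]) (kap ++ [p + 1])]
        simp [hk]
      · have hst : stepA K (c, p, kr, kap) ch = (c + 1, p + 1, kr, kap) := by
          simp [stepA, h, hk]
        rw [hst, ih (c + 1) (p + 1) kr kap]
        simp [hk]

/-- B's loop is the fold inserting the `pairsOf` pairs into the dictionary. -/
lemma foldB_eq : ∀ (s : List Char) (c p : Int) (d : PySem.Dict Int Int),
    (s.foldl stepB (c, p, d)).2.2
      = (pairsOf s c p).foldl (fun d q => d.insert q.1 q.2) d := by
  intro s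
  induction s with
  | nil => intro c p d; simp [pairsOf]
  | cons ch t ih =>
    intro c p d
    rw [List.foldl_cons, pairsOf]
    by_cases h : ch = '-'
    · rw [if_neg (not_not_intro h)]
      have hst : stepB (c, p, d) ch = (c, p + 1, d) := by simp [stepB, h]
      rw [hst]
      exact ih c (p + 1) d
    · rw [if_pos h]
      have hst : stepB (c, p, d) ch = (c + 1, p + 1, d.insert (c + 1) (p + 1)) := by
        simp [stepB, h]
      rw [hst, List.foldl_cons]
      exact ih (c + 1) (p + 1) (d.insert (c + 1) (p + 1))

/-- Distribute a filterMap over the marked key `c` of a strictly increasing key list. -/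
lemma filterMap_if_split (c p : Int) (g : Int → Option Int)
    (hg : ∀ n ≤ c, g n = none) :
    ∀ (ks : List Int), ks.Pairwise (· < ·) →
      ks.filterMap (fun n => if c = n then some p else g n)
        = (if c ∈ ks then [p] else []) ++ ks.filterMap g := by
  intro ks
  induction ks with
  | nil => simp
  | cons n t ih =>
    intro hp
    have hlt : ∀ m ∈ t, n < m := fun m hm => (List.pairwise_cons.1 hp).1 m hm
    have iht := ih (List.pairwise_cons.1 hp).2
    by_cases hcn : c = n
    · subst hcn
      have hcnott : c ∉ t := fun hm => lt_irrefl c (hlt c hm)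
      have hcongr : t.filterMap (fun m => if c = m then some p else g m) = t.filterMap g := by
        refine List.filterMap_congr ?_
        intro m hm
        have hne : ¬ c = m := by have := hlt m hm; omega
        simp [hne]
      simp [hcongr, hg c le_rfl]
    · by_cases hct : c ∈ t
      · have hgn : g n = none := hg n (by have := hlt c hct; omega)
        simp only [List.filterMap_cons, if_neg hcn, hgn, iht, hct, if_pos,
          List.mem_cons]
        simp
      · have hcns : c ∉ n :: t := by simp [hcn, hct]
        have iht' : t.filterMap (fun m => if c = m then some p else g m) = t.filterMap g := by
          simpa [hct] using iht
        cases hgn : g n <;>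
          simp [hcn, hgn, iht', hcns]

/-- Merge lemma: filtering increasing-key pairs by membership in `K` equals looking
    the strictly increasing distinct keys `ks` up in the pairs-as-dictionary. -/
lemma merge_lemma (K : List Int) : ∀ (P : List (Int × Int)) (ks : List Int),
    P.Pairwise (fun a b => a.1 < b.1) → ks.Pairwise (· < ·) →
    (∀ n, n ∈ ks ↔ n ∈ K) →
    (P.filter (fun q => decide (q.1 ∈ K))).map Prod.snd
      = ks.filterMap (fun n => (PySem.Dict.mk P).get? n) := by
  intro P
  induction P with
  | nil =>
    intro ks _ _ _
    have hnone : ∀ n : Int, (PySem.Dict.mk ([] : List (Int × Int))).get? n = none :=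
      fun n => rfl
    simp [hnone]
  | cons q rest ih =>
    intro ks hP hks hmem
    obtain ⟨c, p⟩ := q
    have hrest := (List.pairwise_cons.1 hP).2
    have hgt : ∀ r ∈ rest, c < r.1 := fun r hr => (List.pairwise_cons.1 hP).1 r hr
    have hg : ∀ n ≤ c, (PySem.Dict.mk rest).get? n = none := by
      intro n hn
      rw [PySem.Dict.get?_eq_none_iff_not_mem_keys]
      intro hmemk
      simp only [PySem.Dict.keys, List.mem_map] at hmemk
      obtain ⟨r, hr, hr1⟩ := hmemk
      have := hgt r hr; omega
    have hcongr : ks.filterMap (fun n => (PySem.Dict.mk ((c, p) :: rest)).get? n)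
        = ks.filterMap (fun n => if c = n then some p else (PySem.Dict.mk rest).get? n) := by
      refine List.filterMap_congr ?_
      intro n _
      rw [PySem.Dict.get?_mk_cons]
      by_cases hcn : c = n <;> simp [hcn]
    rw [hcongr, filterMap_if_split c p _ hg ks hks, ← ih ks hrest hks hmem]
    by_cases hcK : c ∈ K
    · have hcks : c ∈ ks := (hmem c).2 hcK
      simp [hcK, hcks]
    · have hcks : c ∉ ks := fun h => hcK ((hmem c).1 h)
      simp [hcK, hcks]

/-- The dictionary built by inserting the fresh increasing `pairsOf` keys is the literal dict. -/
lemma dict_of_foldB (s : List Char) :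
    ((pairsOf s 0 0).foldl (fun (d : PySem.Dict Int Int) q => d.insert q.1 q.2)
        PySem.Dict.empty)
      = PySem.Dict.mk (pairsOf s 0 0) := by
  apply PySem.Dict.ext
  have hfresh : ∀ q ∈ pairsOf s 0 0,
      (PySem.Dict.empty : PySem.Dict Int Int).contains q.1 = false := by
    intro q _; simp
  have hnodup : ((pairsOf s 0 0).map Prod.fst).Nodup :=
    (List.pairwise_map.2 ((pairsOf_pairwise s 0 0).imp (by intro a b h; omega))).nodup
  have := PySem.Dict.items_foldl_insert_fresh (l := pairsOf s 0 0)
      (k := Prod.fst) (v := Prod.snd) (d := PySem.Dict.empty) hfresh hnodup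
  simpa [PySem.Dict.items] using this

-- ===== VERDICT (by name: the statement is the Claim_ definition above) =====
theorem get_key_alignmentpositions_spec : Claim_equal_get_key_alignmentpositions := by
  intro K s _
  show get_key_alignmentpositions K s = get_key_alignmentpositions_alt K s
  unfold get_key_alignmentpositions get_key_alignmentpositions_alt
  rw [foldA_eq K s.toList 0 0 [] []]
  simp only [foldB_eq, dict_of_foldB]
  rw [← merge_lemma K (pairsOf s.toList 0 0)
      (PySem.List.sorted (PySem.Set.ofList K) (fun x => x) false)
      (pairsOf_pairwise s.toList 0 0)
      (PySem.List.sorted_ofList_pairwise_lt K)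
      (by intro n; rw [PySem.List.mem_sorted, PySem.Set.mem_ofList])]
  simp
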